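-- pv_equiv track=rewrite | github.com/sindorim5/Java_Study | Algorithm_SSAFY/0906/SWEA_암호코드스캔 copy.py | ratioCheck
-- ===== SOURCE A (Python) =====
-- def ratioCheck(arr, multi):
--     ratio = []
--     queue = []
--     for i in range(len(arr)):
--         if not queue:
--             queue.append(arr[i])
--         else:
--             if queue[-1] == arr[i]:
--                 queue.append(arr[i])
--             else:
--                 ratio.append(str(len(queue) // multi))
--                 queue = [arr[i]]
--     if queue:
--         ratio.append(str(len(queue) // multi))
--     return "".join(ratio)
-- ===== SOURCE B (Python) =====
-- def ratioCheck(arr, multi):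
--     # Two-phase boundary-index decomposition: first compute the cut positions
--     # (0, every index where the value changes, len(arr)), then emit the
--     # floor-divided differences of consecutive cuts. No run accumulation.
--     if not arr:
--         return ""
--     bounds = [i for i, (a, b) in enumerate(zip(arr, arr[1:]), 1) if a != b]
--     cuts = [0] + bounds + [len(arr)]
--     return "".join(str((hi - lo) // multi) for lo, hi in zip(cuts, cuts[1:]))
-- ===== Notes on version B (the rewrite author's own statement) =====
-- stated objective: alternative
-- what changed: A makes one pass accumulating the current run as an explicit queue and flushing a quotient at each boundary plus a final flush; B never accumulates runs: it first computes the list of cut indices (0, each position where adjacent elements differ, len(arr)) by comparing adjacent pairs, then in a second phase emits str((hi-lo)//multi) for each consecutive pair of cuts.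
import Mathlib
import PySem

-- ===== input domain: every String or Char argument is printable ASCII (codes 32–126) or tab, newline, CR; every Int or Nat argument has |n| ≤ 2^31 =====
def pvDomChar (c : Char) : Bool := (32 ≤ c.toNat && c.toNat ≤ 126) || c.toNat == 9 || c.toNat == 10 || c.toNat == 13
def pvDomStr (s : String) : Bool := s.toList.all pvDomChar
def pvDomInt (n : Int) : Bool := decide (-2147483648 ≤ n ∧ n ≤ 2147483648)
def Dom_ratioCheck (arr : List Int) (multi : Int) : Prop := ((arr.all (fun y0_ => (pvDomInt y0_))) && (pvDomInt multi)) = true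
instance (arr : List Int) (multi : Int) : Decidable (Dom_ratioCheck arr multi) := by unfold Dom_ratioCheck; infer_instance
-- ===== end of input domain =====

-- B replaces A's single-pass queue-and-flush run accumulation by a two-phase
-- boundary-index decomposition: compute cut positions, then emit the
-- floor-divided differences of consecutive cuts (alternative, same cost).


-- ===== PORT A =====
-- str(len(queue) // multi)
def pvEmit (multi : Int) (len : Int) : String :=
  PySem.Int.toStr (PySem.Int.floordiv len multi)

-- one iteration of A's `for i in range(len(arr))` loop body (state = (ratio, queue))
def pvStepA (multi : Int) (st : List String × List Int) (x : Int) : List String × List Int :=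
  if st.2 = [] then (st.1, st.2 ++ [x])
  else if PySem.List.pyGet? st.2 (-1) = some x then (st.1, st.2 ++ [x])
  else (st.1 ++ [pvEmit multi (st.2.length : Int)], [x])

def ratioCheck (arr : List Int) (multi : Int) : String :=
  let st := arr.foldl (pvStepA multi) ([], [])
  let ratio := if st.2 ≠ [] then st.1 ++ [pvEmit multi (st.2.length : Int)] else st.1
  PySem.Str.join "" ratio

-- ===== PORT B =====
-- `if not arr: return ""`; bounds = [i for i,(a,b) in enumerate(zip(arr, arr[1:]), 1) if a != b]
-- (the comprehension's filter-then-collect is a List.filter followed by .map);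
-- cuts = [0] + bounds + [len(arr)]; join of str((hi-lo)//multi) over zip(cuts, cuts[1:])
def ratioCheck_alt (arr : List Int) (multi : Int) : String :=
  if arr = [] then "" else
  let bounds : List Int :=
    ((PySem.List.enumerate (List.zip arr (PySem.List.slice arr (some 1) none)) 1).filter
      (fun p => p.2.1 != p.2.2)).map (fun p => p.1)
  let cuts : List Int := [0] ++ bounds ++ [(arr.length : Int)]
  PySem.Str.join ""
    ((List.zip cuts (PySem.List.slice cuts (some 1) none)).map
      (fun p => PySem.Int.toStr (PySem.Int.floordiv (p.2 - p.1) multi)))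

-- ===== PRECONDITION & SPEC =====
-- Pre_ excludes exactly the inputs where Python A raises ZeroDivisionError: multi = 0 with a nonempty arr.
def Pre_ratioCheck (arr : List Int) (multi : Int) : Prop := multi ≠ 0 ∨ arr = []
instance (arr : List Int) (multi : Int) : Decidable (Pre_ratioCheck arr multi) := by unfold Pre_ratioCheck; infer_instance
def pvWitness_ratioCheck : List Int × Int := ([1, 1, 1, 2, 2, 3], 2)

def Spec_ratioCheck (arr : List Int) (multi : Int) (out : String) : Prop := out = ratioCheck_alt arr multi
instance (arr : List Int) (multi : Int) (out : String) : Decidable (Spec_ratioCheck arr multi out) := by unfold Spec_ratioCheck; infer_instance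

-- ===== CLAIM (what is proved, stated in full; the proofs are below) =====
def Claim_equal_ratioCheck : Prop := ∀ (arr : List Int) (multi : Int), Dom_ratioCheck arr multi → Pre_ratioCheck arr multi → Spec_ratioCheck arr multi (ratioCheck arr multi)

-- ===== LEMMAS AND PROOFS =====

-- proof-only abstraction of the run list, built front-first by a foldr
def pvStepB (x : Int) (runs : List (Int × Int)) : List (Int × Int) :=
  match runs with
  | (y, k) :: rest => if y = x then (x, k + 1) :: rest else (x, 1) :: (y, k) :: rest
  | [] => [(x, 1)]

def pvRuns (arr : List Int) : List (Int × Int) :=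
  arr.foldr pvStepB []

def pvLens (arr : List Int) : List Int :=
  (pvRuns arr).map (fun p => p.2)

-- proof-only recursive characterizations of B's two phases
def pvBnds : Int → List Int → List Int
  | k, x :: y :: rest => (if x ≠ y then [k] else []) ++ pvBnds (k + 1) (y :: rest)
  | _, _ => []

def pvDiffs : List Int → List Int
  | a :: b :: t => (b - a) :: pvDiffs (b :: t)
  | _ => []

theorem pvRuns_cons (y : Int) (rest : List Int) :
    ∃ k r', pvRuns (y :: rest) = (y, k) :: r' := by
  show ∃ k r', pvStepB y (pvRuns rest) = (y, k) :: r'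
  cases h : pvRuns rest with
  | nil => exact ⟨1, [], by simp [pvStepB]⟩
  | cons p r =>
    obtain ⟨z, k⟩ := p
    by_cases hz : z = y
    · exact ⟨k + 1, r, by simp [pvStepB, hz]⟩
    · exact ⟨1, (z, k) :: r, by simp [pvStepB, hz]⟩

-- phase 1: the enumerate/zip/filter comprehension computes pvBnds
theorem pvBnds_eq (arr : List Int) : ∀ (k : Int),
    ((PySem.List.enumerate (List.zip arr arr.tail) k).filter
      (fun p => p.2.1 != p.2.2)).map (fun p => p.1) = pvBnds k arr := by
  induction arr with
  | nil => intro k; simp [pvBnds, PySem.List.enumerate_nil]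
  | cons x xs ih =>
    intro k
    cases xs with
    | nil => simp [pvBnds, PySem.List.enumerate_nil]
    | cons y rest =>
      have hih := ih (k + 1)
      simp only [List.tail_cons] at hih
      by_cases hxy : x = y <;>
        simp [PySem.List.enumerate_cons, hxy, pvBnds, hih]

-- phase 2: successive differences of zip(cuts, cuts[1:]) are pvDiffs
theorem pvDiffs_eq : ∀ (xs : List Int),
    (List.zip xs xs.tail).map (fun p => p.2 - p.1) = pvDiffs xs := by
  intro xs
  induction xs with
  | nil => simp [pvDiffs]
  | cons a ys ih =>
    cases ys with
    | nil => simp [pvDiffs]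
    | cons b t => simpa [pvDiffs] using ih

-- the successive differences of the cuts are exactly the run lengths
theorem pvDiffs_cuts (arr : List Int) (h : arr ≠ []) : ∀ (c : Int),
    pvDiffs (c :: (pvBnds (c + 1) arr ++ [c + (arr.length : Int)])) = pvLens arr := by
  induction arr with
  | nil => exact absurd rfl h
  | cons x xs ih =>
    intro c
    cases xs with
    | nil =>
      simp [pvBnds, pvDiffs, pvLens, pvRuns, pvStepB]
    | cons y rest =>
      have ihc := ih (by simp) (c + 1)
      obtain ⟨k, r', hr⟩ := pvRuns_cons y rest
      by_cases hxy : x = y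
      · -- no boundary: head run grows by one; shift the base cut from c+1 to c
        have hb : pvBnds (c + 1) (x :: y :: rest) = pvBnds (c + 1 + 1) (y :: rest) := by
          simp [pvBnds, hxy]
        have hlen : c + ((x :: y :: rest).length : Int)
            = (c + 1) + ((y :: rest).length : Int) := by
          simp only [List.length_cons]; push_cast; ring
        rw [hb, hlen]
        cases hm : pvBnds (c + 1 + 1) (y :: rest) ++ [(c + 1) + ((y :: rest).length : Int)] with
        | nil => simp at hm
        | cons hhead m' =>
          rw [hm] at ihc
          have hlensA : pvLens (x :: y :: rest) = (k + 1) :: r'.map (fun p => p.2) := by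
            unfold pvLens
            show (pvStepB x (pvRuns (y :: rest))).map (fun p => p.2) = _
            rw [hr]; simp [pvStepB, hxy]
          have hlensB : pvLens (y :: rest) = k :: r'.map (fun p => p.2) := by
            simp [pvLens, hr]
          rw [hlensB] at ihc
          simp only [pvDiffs] at ihc ⊢
          rw [List.cons_eq_cons] at ihc
          obtain ⟨h1, h2⟩ := ihc
          rw [hlensA, List.cons_eq_cons]
          exact ⟨by omega, h2⟩
      · -- boundary at c+1: a fresh run of length 1 in front
        have hb : pvBnds (c + 1) (x :: y :: rest)
            = (c + 1) :: pvBnds (c + 1 + 1) (y :: rest) := by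
          simp [pvBnds, hxy]
        have hlen : c + ((x :: y :: rest).length : Int)
            = (c + 1) + ((y :: rest).length : Int) := by
          simp only [List.length_cons]; push_cast; ring
        rw [hb, hlen]
        have hyx : ¬ y = x := fun hh => hxy hh.symm
        have hlensA : pvLens (x :: y :: rest) = 1 :: pvLens (y :: rest) := by
          unfold pvLens
          show (pvStepB x (pvRuns (y :: rest))).map (fun p => p.2)
              = 1 :: (pvRuns (y :: rest)).map (fun p => p.2)
          rw [hr]; simp [pvStepB, hyx]
        simp only [List.cons_append, pvDiffs]
        rw [ihc, hlensA]
        simp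

-- B's port, rewritten through the abstractions: emissions over the run lengths
theorem ratioCheck_alt_eq (arr : List Int) (multi : Int) (h : arr ≠ []) :
    ratioCheck_alt arr multi
      = PySem.Str.join "" ((pvRuns arr).map
          (fun p => PySem.Int.toStr (PySem.Int.floordiv p.2 multi))) := by
  unfold ratioCheck_alt
  rw [if_neg h]
  simp only [PySem.List.slice_from_one, pvBnds_eq]
  have hmap : ∀ (xs : List Int),
      (List.zip xs xs.tail).map (fun p => PySem.Int.toStr (PySem.Int.floordiv (p.2 - p.1) multi))
        = (pvDiffs xs).map (fun d => PySem.Int.toStr (PySem.Int.floordiv d multi)) := by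
    intro xs
    rw [← pvDiffs_eq, List.map_map]
    rfl
  rw [hmap]
  have : ([0] ++ pvBnds 1 arr ++ [(arr.length : Int)])
      = (0 : Int) :: (pvBnds (0 + 1) arr ++ [0 + (arr.length : Int)]) := by simp
  rw [this, pvDiffs_cuts arr h 0]
  simp [pvLens, List.map_map]
  rfl

-- ===== A-side loop invariant (as in the previous proof) =====
def pvMerge (q : Int) (n : Int) (r : List (Int × Int)) : List (Int × Int) :=
  match r with
  | (y, k) :: rest => if y = q then (q, n + k) :: rest else (q, n) :: (y, k) :: rest
  | [] => [(q, n)]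

theorem pvMerge_stepB (q x : Int) (n : Int) (r : List (Int × Int)) :
    pvMerge q n (pvStepB x r) =
      if x = q then pvMerge q (n + 1) r else (q, n) :: pvStepB x r := by
  cases r with
  | nil => by_cases h : x = q <;> simp [pvStepB, pvMerge, h]
  | cons p rest =>
    obtain ⟨y, k⟩ := p
    by_cases hyx : y = x
    · subst hyx
      by_cases hxq : y = q
      · subst hxq
        simp [pvStepB, pvMerge]
        ring
      · simp [pvStepB, pvMerge, hxq]
    · by_cases hxq : x = q
      · subst hxq
        simp [pvStepB, pvMerge, hyx]
      · simp [pvStepB, pvMerge, hyx, hxq]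

theorem pvMerge_one (x : Int) (r : List (Int × Int)) : pvMerge x 1 r = pvStepB x r := by
  cases r with
  | nil => simp [pvMerge, pvStepB]
  | cons p rest =>
    obtain ⟨y, k⟩ := p
    by_cases h : y = x <;> simp [pvMerge, pvStepB, h, add_comm]

theorem pvGet_neg_one_replicate (m : Nat) (q : Int) :
    PySem.List.pyGet? (List.replicate (m + 1) q) (-1) = some q := by
  rw [PySem.List.pyGet?_neg_one]
  simp [List.getLast?_replicate]

-- main invariant: running A's loop with a pending queue = replicate (m+1) q, then flushing,
-- produces `ratio` followed by the emissions of the merged run list of the rest.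
theorem pvLoopA (multi : Int) (xs : List Int) : ∀ (ratio : List String) (q : Int) (m : Nat),
    (let st := xs.foldl (pvStepA multi) (ratio, List.replicate (m + 1) q)
     if st.2 ≠ [] then st.1 ++ [pvEmit multi (st.2.length : Int)] else st.1)
    = ratio ++ (pvMerge q ((m : Int) + 1) (pvRuns xs)).map
        (fun p => PySem.Int.toStr (PySem.Int.floordiv p.2 multi)) := by
  induction xs with
  | nil =>
    intro ratio q m
    simp [pvRuns, pvMerge, pvEmit]
  | cons x xs ih =>
    intro ratio q m
    by_cases hxq : x = q
    · subst hxq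
      have h1 : pvStepA multi (ratio, List.replicate (m + 1) x) x
          = (ratio, List.replicate (m + 1 + 1) x) := by
        simp [pvStepA, List.replicate_succ']
      have h2 := ih ratio x (m + 1)
      simp only [List.foldl_cons, h1]
      rw [h2]
      simp only [pvRuns, List.foldr_cons]
      rw [pvMerge_stepB]
      simp
    · have hqx : ¬ q = x := fun h => hxq h.symm
      have h1 : pvStepA multi (ratio, List.replicate (m + 1) q) x
          = (ratio ++ [pvEmit multi ((List.replicate (m + 1) q).length : Int)],
             List.replicate (0 + 1) x) := by
        simp [pvStepA, pvGet_neg_one_replicate, hqx]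
      have h2 := ih (ratio ++ [pvEmit multi ((List.replicate (m + 1) q).length : Int)]) x 0
      simp only [List.foldl_cons, h1]
      rw [h2]
      simp only [pvRuns, List.foldr_cons]
      rw [pvMerge_stepB]
      rw [show ((0 : Nat) : Int) + 1 = (1 : Int) by norm_num, pvMerge_one]
      simp [hxq, pvEmit, List.append_assoc]

-- ===== VERDICT (by name: the statement is the Claim_ definition above) =====
theorem ratioCheck_spec : Claim_equal_ratioCheck := by
  intro arr multi _ _
  unfold Spec_ratioCheck ratioCheck
  cases arr with
  | nil => simp [ratioCheck_alt]; decide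
  | cons x xs =>
    rw [ratioCheck_alt_eq (x :: xs) multi (by simp)]
    have h0 : pvStepA multi ([], []) x = ([], List.replicate (0 + 1) x) := by
      simp [pvStepA]
    simp only [List.foldl_cons, h0]
    rw [pvLoopA multi xs [] x 0]
    simp only [List.nil_append, pvRuns, List.foldr_cons]
    rw [show ((0 : Nat) : Int) + 1 = (1 : Int) by norm_num, pvMerge_one]
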